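-- pv_equiv track=rewrite | github.com/clemaitoro/Random-projects | Python Search Engine/Search-Engine.py | check_dups2
-- ===== SOURCE A (Python) =====
-- def check_dups2(data):  # check for duplicates and put them together
--     res = []  # start with an empty list
--     if len(data) != 0:  # if the list is not empty
--         fresh = data[0]  # copy the first element(list) of the list to fresh
--
--         i = 1  # start with the second element of the list
--         while i < len(data):  # while the list has elements
--             # if the first element of the fresh list is equal to the first element of the list within the list
--             if fresh[0] == data[i][0]:
--                 # add the second element of the list within the list to the fresh list
--                 fresh.append(data[i][1])
--                 # add the third element of the list within the list to the fresh list
--                 fresh.append(data[i][2])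
--             # if the first element of the fresh list is not equal to the first element of the list within the list
--             elif fresh != data[i][0]:
--                 res.append(fresh)  # add the fresh list to the result list
--                 fresh = data[i]  # copy the list data to fresh
--             i += 1  # increase the index
--         res.append(fresh)  # add the last fresh list to the result list
--     return res  # return the result list
-- ===== SOURCE B (Python) =====
-- def check_dups2(data):  # group consecutive sublists sharing the same first element
--     # Phase 1: split data into runs of consecutive sublists with equal first element.
--     runs = []
--     for sub in data:
--         if runs and runs[-1][0][0] == sub[0]:
--             runs[-1].append(sub)
--         else:
--             runs.append([sub])
--     # Phase 2: for each run, extend its leader (in place, as A does) with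
--     # members' second and third elements.
--     res = []
--     for group in runs:
--         base = group[0]
--         for m in group[1:]:
--             base.append(m[1])
--             base.append(m[2])
--         res.append(base)
--     return res
-- ===== Notes on version B (the rewrite author's own statement) =====
-- stated objective: idiomatic
-- what changed: Replaced A's single while-loop with a running 'fresh' accumulator by a two-phase pass: first split the list into runs of consecutive sublists sharing a first element, then fold each run onto its leader.
-- outside the precondition, e.g. on check_dups2([[]]): A returns [[]], B returns [[]]
import Mathlib
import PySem

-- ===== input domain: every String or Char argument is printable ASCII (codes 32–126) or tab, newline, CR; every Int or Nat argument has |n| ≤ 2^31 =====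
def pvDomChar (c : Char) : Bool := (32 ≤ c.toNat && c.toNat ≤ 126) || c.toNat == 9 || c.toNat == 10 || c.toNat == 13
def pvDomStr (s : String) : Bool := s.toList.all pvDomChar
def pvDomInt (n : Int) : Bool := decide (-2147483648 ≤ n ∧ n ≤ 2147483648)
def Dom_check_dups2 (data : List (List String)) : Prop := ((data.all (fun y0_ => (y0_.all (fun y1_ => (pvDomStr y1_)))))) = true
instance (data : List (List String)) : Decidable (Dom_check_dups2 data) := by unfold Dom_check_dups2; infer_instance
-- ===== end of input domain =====

-- B restructures A's running-accumulator scan into a two-phase group-then-fold pass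
-- (idiomatic; same cost). Both Pythons mutate the original sublists in place; the
-- equivalence proved here is about the RETURN value only.

-- ===== PORT A =====
-- while-loop over i with the running 'fresh' list and accumulator 'res';
-- Python's 'elif fresh != data[i][0]' compares a list with a string and is
-- always True, so it is ported as the unconditional else branch.
-- data[i][1] / data[i][2] are ported with a "" default: on Python they raise
-- outside Pre_check_dups2, where nothing is claimed.
def check_dups2_go (rest : List (List String)) (fresh : List String)
    (res : List (List String)) : List (List String) :=
  match rest with
  | [] => res ++ [fresh]
  | d :: tl =>
    if fresh.headD "" == d.headD "" then
      check_dups2_go tl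
        (fresh ++ [((PySem.List.pyGet? d 1).getD ""), ((PySem.List.pyGet? d 2).getD "")]) res
    else
      check_dups2_go tl d (res ++ [fresh])

def check_dups2 (data : List (List String)) : List (List String) :=
  match data with
  | [] => []
  | d0 :: tl => check_dups2_go tl d0 []

-- ===== PORT B =====
-- Phase 1: split into runs (runs[-1] append ↔ dropLast/getLast?).
def check_dups2_step (runs : List (List (List String))) (sub : List String) :
    List (List (List String)) :=
  match runs.getLast? with
  | some g =>
      if (g.headD []).headD "" == sub.headD "" then runs.dropLast ++ [g ++ [sub]]
      else runs ++ [[sub]]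
  | none => [[sub]]

def check_dups2_runs (data : List (List String)) : List (List (List String)) :=
  data.foldl check_dups2_step []

-- Phase 2: extend the run's leader with members' second and third elements.
def check_dups2_pg (g : List (List String)) : List String :=
  match g with
  | [] => []
  | base :: ms =>
    ms.foldl (fun b m =>
      b ++ [((PySem.List.pyGet? m 1).getD ""), ((PySem.List.pyGet? m 2).getD "")]) base

def check_dups2_alt (data : List (List String)) : List (List String) :=
  (check_dups2_runs data).foldl (fun res g => res ++ [check_dups2_pg g]) []

-- ===== PRECONDITION & SPEC =====
-- Pre_ excludes the inputs on which Python A raises IndexError: an empty sublist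
-- (fresh[0]/data[i][0]) or a sublist matching its predecessor's first element but
-- shorter than 3 (data[i][1]/data[i][2]); it is slightly narrower only in that an
-- empty sublist that is never indexed (e.g. data = [[]]) is also excluded, where
-- both A and B return the same value.
def Pre_check_dups2 (data : List (List String)) : Prop :=
  (∀ x ∈ data, x ≠ []) ∧
  List.IsChain (fun a b => a.headD "" = b.headD "" → 3 ≤ b.length) data
instance (data : List (List String)) : Decidable (Pre_check_dups2 data) := by
  unfold Pre_check_dups2; infer_instance

def pvWitness_check_dups2 : List (List String) :=
  [["a", "x", "y"], ["a", "p", "q"], ["b", "u", "v"]]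

def Spec_check_dups2 (data : List (List String)) (out : List (List String)) : Prop := out = check_dups2_alt data
instance (data : List (List String)) (out : List (List String)) : Decidable (Spec_check_dups2 data out) := by unfold Spec_check_dups2; infer_instance

-- ===== CLAIM (what is proved, stated in full; the proofs are below) =====
def Claim_equal_check_dups2 : Prop := ∀ (data : List (List String)), Dom_check_dups2 data → Pre_check_dups2 data → Spec_check_dups2 data (check_dups2 data)

-- ===== LEMMAS AND PROOFS =====

theorem pg_singleton (d : List String) : check_dups2_pg [d] = d := rfl

theorem pg_snoc (base : List String) (ms : List (List String)) (d : List String) :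
    check_dups2_pg (base :: (ms ++ [d])) =
      check_dups2_pg (base :: ms) ++
        [((PySem.List.pyGet? d 1).getD ""), ((PySem.List.pyGet? d 2).getD "")] := by
  simp [check_dups2_pg, List.foldl_append]

theorem pg_headD (base : List String) (ms : List (List String)) (hb : base ≠ []) :
    (check_dups2_pg (base :: ms)).headD "" = base.headD "" := by
  simp only [check_dups2_pg]
  rw [PySem.List.foldl_append_eq_flatMap]
  cases base with
  | nil => exact absurd rfl hb
  | cons b bs => rfl

theorem go_eq (tl : List (List String)) : ∀ (runs : List (List (List String)))
    (base : List String) (ms : List (List String)),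
    base ≠ [] → (∀ x ∈ tl, x ≠ []) →
    check_dups2_go tl (check_dups2_pg (base :: ms))
        (runs.foldl (fun res g => res ++ [check_dups2_pg g]) []) =
      (tl.foldl check_dups2_step (runs ++ [base :: ms])).foldl
        (fun res g => res ++ [check_dups2_pg g]) [] := by
  induction tl with
  | nil =>
    intro runs base ms _ _
    simp [check_dups2_go]
  | cons d tl ih =>
    intro runs base ms hb hf
    obtain ⟨hd, htl⟩ := List.forall_mem_cons.mp hf
    have hcond : ((check_dups2_pg (base :: ms)).headD "" == d.headD "")
        = (base.headD "" == d.headD "") := by rw [pg_headD base ms hb]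
    have hstep : check_dups2_step (runs ++ [base :: ms]) d =
        if base.headD "" == d.headD "" then runs ++ [base :: (ms ++ [d])]
        else (runs ++ [base :: ms]) ++ [[d]] := by
      simp [check_dups2_step]
    simp only [check_dups2_go, List.foldl_cons, hcond, hstep]
    by_cases h : (base.headD "" == d.headD "") = true
    · simp only [h, if_pos]
      rw [← pg_snoc]
      exact ih runs base (ms ++ [d]) hb htl
    · simp only [Bool.not_eq_true] at h
      simp only [h, Bool.false_eq_true, if_false]
      have := ih (runs ++ [base :: ms]) d [] hd htl
      rw [pg_singleton] at this
      rw [← this]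
      simp

-- ===== VERDICT (by name: the statement is the Claim_ definition above) =====
theorem check_dups2_spec : Claim_equal_check_dups2 := by
  unfold Claim_equal_check_dups2
  intro data _ hpre
  unfold Spec_check_dups2
  cases data with
  | nil => rfl
  | cons d0 tl =>
    obtain ⟨hd0, htl⟩ := List.forall_mem_cons.mp hpre.1
    have h := go_eq tl [] d0 [] hd0 htl
    rw [pg_singleton] at h
    simp only [check_dups2, check_dups2_alt, check_dups2_runs, List.foldl_cons]
    have hstep0 : check_dups2_step [] d0 = [[d0]] := rfl
    rw [hstep0]
    simpa using h
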